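-- pv_equiv track=rewrite | github.com/Svenja737/sd_error_corrector | src/data_lib/data_inspection.py | count_label_distribution
-- ===== SOURCE A (Python) =====
-- def count_label_distribution(label_df):
--     labels = [1, 2, 3, 4, 5, 6, 7, 8, 9, 10]
--     label_dist = []
--     for i in labels:
--         is_i = 0
--         for l in label_df:
--             if len(list(set(l))) == i:
--                 is_i += 1
--
--         label_dist.append((i, is_i))
--
--     return label_dist
-- ===== SOURCE B (Python) =====
-- def count_label_distribution(label_df):
--     counts = {}
--     for l in label_df:
--         n = len(set(l))
--         counts[n] = counts.get(n, 0) + 1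
--     return [(i, counts.get(i, 0)) for i in range(1, 11)]
-- ===== Notes on version B (the rewrite author's own statement) =====
-- stated objective: simpler
-- what changed: Replaces ten scans of label_df (one per bucket 1..10) with a single histogram-building pass over label_df keyed by the number of distinct labels, then emits the ten (i, count) pairs from the table.
import Mathlib
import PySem

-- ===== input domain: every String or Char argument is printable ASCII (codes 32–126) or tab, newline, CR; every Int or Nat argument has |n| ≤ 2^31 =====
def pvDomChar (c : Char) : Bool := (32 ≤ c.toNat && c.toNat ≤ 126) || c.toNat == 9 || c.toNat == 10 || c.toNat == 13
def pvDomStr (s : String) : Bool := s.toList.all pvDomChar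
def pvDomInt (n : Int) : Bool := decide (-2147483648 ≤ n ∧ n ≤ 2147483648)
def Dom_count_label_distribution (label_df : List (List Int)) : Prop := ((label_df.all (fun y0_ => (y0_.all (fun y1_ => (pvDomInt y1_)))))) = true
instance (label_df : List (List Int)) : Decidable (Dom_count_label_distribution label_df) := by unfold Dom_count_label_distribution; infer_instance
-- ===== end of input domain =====

-- B replaces A's ten scans of label_df by one histogram-building pass plus a fixed ten-entry readout (simpler).

-- ===== PORT A =====
def count_label_distribution (label_df : List (List Int)) : List (Int × Int) :=
  let labels : List Int := [1, 2, 3, 4, 5, 6, 7, 8, 9, 10]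
  labels.foldl (fun label_dist i =>
    let is_i : Int := label_df.foldl (fun acc l =>
      if ((PySem.Set.ofList l).length : Int) == i then acc + 1 else acc) 0
    label_dist ++ [(i, is_i)]) []

-- ===== PORT B =====
def count_label_distribution_alt (label_df : List (List Int)) : List (Int × Int) :=
  let counts : PySem.Dict Int Int := label_df.foldl (fun d l =>
    let n : Int := ((PySem.Set.ofList l).length : Int)
    d.insert n (d.getD n 0 + 1)) PySem.Dict.empty
  (PySem.List.pyRange 1 11 1).map (fun i => (i, counts.getD i 0))

-- ===== PRECONDITION & SPEC =====
def Spec_count_label_distribution (label_df : List (List Int)) (out : List (Int × Int)) : Prop := out = count_label_distribution_alt label_df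
instance (label_df : List (List Int)) (out : List (Int × Int)) : Decidable (Spec_count_label_distribution label_df out) := by unfold Spec_count_label_distribution; infer_instance

-- ===== CLAIM (what is proved, stated in full; the proofs are below) =====
def Claim_equal_count_label_distribution : Prop := ∀ (label_df : List (List Int)), Dom_count_label_distribution label_df → Spec_count_label_distribution label_df (count_label_distribution label_df)

-- ===== LEMMAS AND PROOFS =====

-- A's inner counting loop counts the elements whose distinct-label number equals i
theorem pv_inner_count (label_df : List (List Int)) (i : Int) :
    label_df.foldl (fun acc l =>
      if ((PySem.Set.ofList l).length : Int) == i then acc + 1 else acc) 0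
    = ((label_df.map (fun l => ((PySem.Set.ofList l).length : Int))).count i : Int) := by
  have h : ∀ (xs : List (List Int)) (a : Int),
      xs.foldl (fun acc l =>
        if ((PySem.Set.ofList l).length : Int) == i then acc + 1 else acc) a
      = a + ((xs.map (fun l => ((PySem.Set.ofList l).length : Int))).count i : Int) := by
    intro xs
    induction xs with
    | nil => intro a; simp
    | cons x xs ih =>
      intro a
      simp only [List.foldl_cons, List.map_cons, List.count_cons, ih]
      by_cases hx : ((PySem.Set.ofList x).length : Int) = i
      · simp [hx]; push_cast; ring
      · simp [hx, beq_iff_eq, if_neg hx]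
  simpa using h label_df 0

-- B's histogram lookup is the same count
theorem pv_counts_getD (label_df : List (List Int)) (i : Int) :
    (label_df.foldl (fun d l =>
      let n : Int := ((PySem.Set.ofList l).length : Int)
      d.insert n (d.getD n 0 + 1)) PySem.Dict.empty).getD i 0
    = ((label_df.map (fun l => ((PySem.Set.ofList l).length : Int))).count i : Int) := by
  have := PySem.Dict.getD_foldl_insert_add_one
    (l := label_df.map (fun l => ((PySem.Set.ofList l).length : Int)))
    (d := (PySem.Dict.empty : PySem.Dict Int Int)) (v := i)
  simpa [List.foldl_map, PySem.Dict.getD, PySem.Dict.empty, PySem.Dict.get?] using this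

-- ===== VERDICT (by name: the statement is the Claim_ definition above) =====
theorem count_label_distribution_spec : Claim_equal_count_label_distribution := by
  intro label_df _
  unfold Spec_count_label_distribution count_label_distribution count_label_distribution_alt
  have hrange : PySem.List.pyRange 1 11 1 = [1,2,3,4,5,6,7,8,9,10] := by decide
  simp only [hrange, List.map_cons, List.map_nil, List.foldl_cons, List.foldl_nil,
    pv_inner_count, pv_counts_getD]
  rfl
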